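-- pv_equiv track=rewrite | github.com/renatoi/wow-resonance | tools/verify_classic_sounds.py | pick_best_sound
-- ===== SOURCE A (Python) =====
-- GENERIC_SWING_FIDS = {569827, 569828, 569829, 569830, 569831}  # SwingWeaponSpecialWarrior*.ogg
--
-- GENERIC_PRECAST = {568938, 568915, 569766, 569767, 569764, 569765, 569424}  # generic cast sounds
--
-- GENERIC_CAST = {569777, 569778, 569779, 569780, 569781}  # generic cast variants
--
-- def classify_fid(fid, filename):
--     """Classify a FID as impact/cast/precast/swing/ambient."""
--     fn = filename.lower()
--     if fid in GENERIC_SWING_FIDS or "swingweapon" in fn: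
--         return "swing"
--     if fid in GENERIC_PRECAST:
--         return "generic-cast"
--     if fid in GENERIC_CAST:
--         return "generic-cast"
--     if "precast" in fn:
--         return "precast"
--     if "impact" in fn or "target" in fn or "hit" in fn:
--         return "impact"
--     if "cast" in fn:
--         return "cast"
--     if "loop" in fn or "state" in fn or "channel" in fn:
--         return "loop"
--     if "area" in fn or "base" in fn:
--         return "area"
--     return "other"
--
-- def pick_best_sound(fids_with_names):
--     """Pick the most characteristic sound from a set of (fid, name) pairs."""
--     classified = []
--     for fid, name in fids_with_names:
--         cat = classify_fid(fid, name)
--         classified.append((cat, fid, name))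
--
--     # Priority: impact > cast > other > area > precast > loop > generic-cast > swing
--     priority = {"impact": 0, "cast": 1, "other": 2, "area": 3, "precast": 4, "loop": 5, "generic-cast": 6, "swing": 7}
--     classified.sort(key=lambda x: priority.get(x[0], 99))
--     return classified
-- ===== SOURCE B (Python) =====
-- GENERIC_SWING_FIDS = {569827, 569828, 569829, 569830, 569831}  # SwingWeaponSpecialWarrior*.ogg
--
-- GENERIC_PRECAST = {568938, 568915, 569766, 569767, 569764, 569765, 569424}  # generic cast sounds
--
-- GENERIC_CAST = {569777, 569778, 569779, 569780, 569781}  # generic cast variants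
--
-- def classify_fid(fid, filename):
--     """Classify a FID as impact/cast/precast/swing/ambient."""
--     fn = filename.lower()
--     if fid in GENERIC_SWING_FIDS or "swingweapon" in fn:
--         return "swing"
--     if fid in GENERIC_PRECAST:
--         return "generic-cast"
--     if fid in GENERIC_CAST:
--         return "generic-cast"
--     if "precast" in fn:
--         return "precast"
--     if "impact" in fn or "target" in fn or "hit" in fn:
--         return "impact"
--     if "cast" in fn:
--         return "cast"
--     if "loop" in fn or "state" in fn or "channel" in fn:
--         return "loop"
--     if "area" in fn or "base" in fn:
--         return "area"
--     return "other"
--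
-- CATEGORY_ORDER = ["impact", "cast", "other", "area", "precast", "loop", "generic-cast", "swing"]
--
-- def pick_best_sound(fids_with_names):
--     """Pick the most characteristic sound from a set of (fid, name) pairs."""
--     classified = [(classify_fid(fid, name), fid, name) for fid, name in fids_with_names]
--     # group instead of sort: concatenate the eight category buckets in priority order
--     return [t for c in CATEGORY_ORDER for t in classified if t[0] == c]
-- ===== Notes on version B (the rewrite author's own statement) =====
-- stated objective: alternative
-- what changed: B replaces the priority-keyed stable comparison sort with a sort-free bucket/group pass: it classifies each pair once and concatenates the eight category buckets (filters) in priority order, which yields the same stably ordered list.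
import Mathlib
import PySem

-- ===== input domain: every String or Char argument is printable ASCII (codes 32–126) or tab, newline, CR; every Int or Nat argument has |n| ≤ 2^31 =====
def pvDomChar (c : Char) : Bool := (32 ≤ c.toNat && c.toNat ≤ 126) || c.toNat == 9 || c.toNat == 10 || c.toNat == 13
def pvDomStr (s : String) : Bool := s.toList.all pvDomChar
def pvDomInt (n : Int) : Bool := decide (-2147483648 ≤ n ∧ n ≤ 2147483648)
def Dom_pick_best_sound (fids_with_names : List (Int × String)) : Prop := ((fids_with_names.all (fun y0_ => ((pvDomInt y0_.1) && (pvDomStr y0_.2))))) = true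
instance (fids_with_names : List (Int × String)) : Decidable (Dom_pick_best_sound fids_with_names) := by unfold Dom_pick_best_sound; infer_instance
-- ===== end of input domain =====

-- B replaces A's priority-keyed stable sort by a sort-free grouping pass (eight category
-- buckets concatenated in priority order); same return value, alternative algorithm.

-- ===== PORT A =====
def GENERIC_SWING_FIDS : PySem.Set Int := PySem.Set.ofList [569827, 569828, 569829, 569830, 569831]

def GENERIC_PRECAST : PySem.Set Int := PySem.Set.ofList [568938, 568915, 569766, 569767, 569764, 569765, 569424]

def GENERIC_CAST : PySem.Set Int := PySem.Set.ofList [569777, 569778, 569779, 569780, 569781]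

def classify_fid (fid : Int) (filename : String) : String :=
  let fn := PySem.Str.lower filename
  if GENERIC_SWING_FIDS.contains fid || PySem.Str.isIn "swingweapon" fn then "swing"
  else if GENERIC_PRECAST.contains fid then "generic-cast"
  else if GENERIC_CAST.contains fid then "generic-cast"
  else if PySem.Str.isIn "precast" fn then "precast"
  else if PySem.Str.isIn "impact" fn || PySem.Str.isIn "target" fn || PySem.Str.isIn "hit" fn then "impact"
  else if PySem.Str.isIn "cast" fn then "cast"
  else if PySem.Str.isIn "loop" fn || PySem.Str.isIn "state" fn || PySem.Str.isIn "channel" fn then "loop"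
  else if PySem.Str.isIn "area" fn || PySem.Str.isIn "base" fn then "area"
  else "other"

-- the local 'priority' dict of A, lifted to a named helper
def priorityDict : PySem.Dict String Int :=
  PySem.Dict.ofList [("impact", 0), ("cast", 1), ("other", 2), ("area", 3),
                     ("precast", 4), ("loop", 5), ("generic-cast", 6), ("swing", 7)]

def pick_best_sound (fids_with_names : List (Int × String)) : List (String × Int × String) :=
  let classified := fids_with_names.foldl
    (fun acc p => acc ++ [(classify_fid p.1 p.2, p.1, p.2)]) []
  let priority := priorityDict
  PySem.List.sorted classified (fun x => priority.getD x.1 99)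

-- ===== PORT B =====
def CATEGORY_ORDER : List String :=
  ["impact", "cast", "other", "area", "precast", "loop", "generic-cast", "swing"]

def pick_best_sound_alt (fids_with_names : List (Int × String)) : List (String × Int × String) :=
  let classified := fids_with_names.map (fun p => (classify_fid p.1 p.2, p.1, p.2))
  CATEGORY_ORDER.flatMap (fun c => classified.filter (fun t => t.1 == c))

-- ===== PRECONDITION & SPEC =====
def Spec_pick_best_sound (fids_with_names : List (Int × String)) (out : List (String × Int × String)) : Prop := out = pick_best_sound_alt fids_with_names
instance (fids_with_names : List (Int × String)) (out : List (String × Int × String)) : Decidable (Spec_pick_best_sound fids_with_names out) := by unfold Spec_pick_best_sound; infer_instance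

-- ===== CLAIM (what is proved, stated in full; the proofs are below) =====
def Claim_equal_pick_best_sound : Prop := ∀ (fids_with_names : List (Int × String)), Dom_pick_best_sound fids_with_names → Spec_pick_best_sound fids_with_names (pick_best_sound fids_with_names)

-- ===== LEMMAS AND PROOFS =====

theorem insertBy_append_left {α : Type} (before : α → α → Bool) (x : α) (l t : List α)
    (h : ∀ y ∈ l, before x y = false) :
    PySem.List.insertBy before x (l ++ t) = l ++ PySem.List.insertBy before x t := by
  induction l with
  | nil => simp
  | cons a l ih =>
    simp only [List.cons_append, PySem.List.insertBy, h a (by simp)]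
    simp [ih (fun y hy => h y (by simp [hy]))]

theorem insertBy_forall_before {α : Type} (before : α → α → Bool) (x : α) (l : List α)
    (h : ∀ y ∈ l, before x y = true) :
    PySem.List.insertBy before x l = x :: l := by
  cases l with
  | nil => rfl
  | cons a l => simp [PySem.List.insertBy, h a (by simp)]

theorem flatMap_congr' {α β : Type} {l : List α} {f g : α → List β}
    (h : ∀ a ∈ l, f a = g a) : l.flatMap f = l.flatMap g := by
  induction l with
  | nil => rfl
  | cons a l ih =>
    simp only [List.flatMap_cons, h a (by simp), ih (fun a ha => h a (by simp [ha]))]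

theorem insertBy_flatMap_filter {α : Type} (key : α → Int) (x : α) (ks : List Int)
    (hks : ks.Pairwise (· < ·)) (hk : key x ∈ ks) (xs : List α) :
    PySem.List.insertBy (fun a b => decide (key a < key b)) x
        (ks.flatMap (fun k => xs.filter (fun y => key y == k)))
      = ks.flatMap (fun k => (xs ++ [x]).filter (fun y => key y == k)) := by
  induction ks with
  | nil => simp at hk
  | cons k ks ih =>
    have hlt : ∀ k' ∈ ks, k < k' := fun k' h' => (List.pairwise_cons.mp hks).1 k' h'
    have hpw : ks.Pairwise (· < ·) := (List.pairwise_cons.mp hks).2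
    by_cases hxk : key x = k
    · -- x belongs to the head bucket: it goes to its end, tail buckets unchanged
      have h1 : ∀ y ∈ xs.filter (fun y => key y == k), (decide (key x < key y)) = false := by
        intro y hy
        have : key y = k := by simpa using (List.mem_filter.mp hy).2
        simp [this, hxk]
      have h2 : ∀ y ∈ ks.flatMap (fun k => xs.filter (fun y => key y == k)),
          (decide (key x < key y)) = true := by
        intro y hy
        rcases List.mem_flatMap.mp hy with ⟨k', hk', hy'⟩
        have : key y = k' := by simpa using (List.mem_filter.mp hy').2
        simp [this, hxk]
        exact hlt k' hk'
      have hne : ∀ k' ∈ ks, (xs ++ [x]).filter (fun y => key y == k')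
          = xs.filter (fun y => key y == k') := by
        intro k' hk'
        have : ¬ (key x = k') := by
          have := hlt k' hk'; omega
        simp [List.filter_append, this]
      simp only [List.flatMap_cons]
      rw [insertBy_append_left _ _ _ _ h1, insertBy_forall_before _ _ _ h2]
      have hhead : (xs ++ [x]).filter (fun y => key y == k)
          = xs.filter (fun y => key y == k) ++ [x] := by
        simp [List.filter_append, hxk]
      have htail : ks.flatMap (fun k => (xs ++ [x]).filter (fun y => key y == k))
          = ks.flatMap (fun k => xs.filter (fun y => key y == k)) := flatMap_congr' hne
      rw [hhead, htail]
      simp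
    · -- x belongs to a later bucket: skip the head bucket and recurse
      have hk' : key x ∈ ks := by
        rcases List.mem_cons.mp hk with h | h
        · exact absurd h hxk
        · exact h
      have h1 : ∀ y ∈ xs.filter (fun y => key y == k), (decide (key x < key y)) = false := by
        intro y hy
        have hy' : key y = k := by simpa using (List.mem_filter.mp hy).2
        have : k < key x := hlt _ hk'
        simp [hy']; omega
      have hhead : (xs ++ [x]).filter (fun y => key y == k)
          = xs.filter (fun y => key y == k) := by
        simp [List.filter_append, hxk]
      simp only [List.flatMap_cons]
      rw [insertBy_append_left _ _ _ _ h1, ih hpw hk', hhead]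

theorem sorted_eq_flatMap_filter {α : Type} (key : α → Int) (ks : List Int)
    (hks : ks.Pairwise (· < ·)) (xs : List α) (hx : ∀ x ∈ xs, key x ∈ ks) :
    PySem.List.sorted xs key = ks.flatMap (fun k => xs.filter (fun y => key y == k)) := by
  rw [PySem.List.sorted_eq_foldl_insertBy]
  induction xs using List.reverseRecOn with
  | nil => simp
  | append_singleton xs x ih =>
    rw [List.foldl_append, List.foldl_cons, List.foldl_nil,
        ih (fun y hy => hx y (by simp [hy]))]
    exact insertBy_flatMap_filter key x ks hks (hx x (by simp)) xs

theorem classify_fid_mem (fid : Int) (name : String) :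
    classify_fid fid name ∈ CATEGORY_ORDER := by
  simp only [classify_fid]
  split_ifs <;> simp [CATEGORY_ORDER]

theorem foldl_append_eq_map {α β : Type} (f : α → β) (xs : List α) (init : List β) :
    xs.foldl (fun acc p => acc ++ [f p]) init = init ++ xs.map f := by
  induction xs generalizing init with
  | nil => simp
  | cons a xs ih => simp [ih]

theorem filter_key_eq_filter_cat (L : List (String × Int × String))
    (hm : ∀ t ∈ L, t.1 ∈ CATEGORY_ORDER) (c : String) (k : Int)
    (h : ∀ s ∈ CATEGORY_ORDER, ((priorityDict.getD s 99 == k) = (s == c))) :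
    L.filter (fun t => priorityDict.getD t.1 99 == k) = L.filter (fun t => t.1 == c) :=
  List.filter_congr (fun t ht => h t.1 (hm t ht))

theorem pick_best_sound_spec : Claim_equal_pick_best_sound := by
  intro l _
  unfold Spec_pick_best_sound pick_best_sound pick_best_sound_alt
  simp only [foldl_append_eq_map, List.nil_append]
  set L := l.map (fun p => (classify_fid p.1 p.2, p.1, p.2)) with hL
  have hm : ∀ t ∈ L, t.1 ∈ CATEGORY_ORDER := by
    intro t ht
    rcases List.mem_map.mp ht with ⟨p, _, rfl⟩
    exact classify_fid_mem p.1 p.2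
  have hx : ∀ t ∈ L, priorityDict.getD t.1 99 ∈ ([0, 1, 2, 3, 4, 5, 6, 7] : List Int) := by
    intro t ht
    have := hm t ht
    unfold CATEGORY_ORDER at this
    simp only [List.mem_cons, List.not_mem_nil, or_false] at this
    rcases this with h | h | h | h | h | h | h | h <;> rw [h] <;> decide
  rw [sorted_eq_flatMap_filter (fun t => priorityDict.getD t.1 99)
        ([0, 1, 2, 3, 4, 5, 6, 7] : List Int) (by decide) L hx]
  unfold CATEGORY_ORDER
  simp only [List.flatMap_cons, List.flatMap_nil, List.append_nil]
  rw [filter_key_eq_filter_cat L hm "impact" 0 (by decide),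
      filter_key_eq_filter_cat L hm "cast" 1 (by decide),
      filter_key_eq_filter_cat L hm "other" 2 (by decide),
      filter_key_eq_filter_cat L hm "area" 3 (by decide),
      filter_key_eq_filter_cat L hm "precast" 4 (by decide),
      filter_key_eq_filter_cat L hm "loop" 5 (by decide),
      filter_key_eq_filter_cat L hm "generic-cast" 6 (by decide),
      filter_key_eq_filter_cat L hm "swing" 7 (by decide)]
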